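-- pv_equiv track=rewrite | github.com/tmad4000/etymology-finder | online/dblookup.py | get_all_from_origin
-- ===== SOURCE A (Python) =====
-- def get_origin(relations, word, path=False):
--     # threshold to avoid loops, this is super hacky
--     threshold = 5
--     count = 0
--     if not path:
--         lookup = word
--         #lookup = language + ': ' + word
--         while lookup in relations and count < threshold:
--             count += 1
--             lookup = relations[lookup]
--         return lookup
--     else:
--         lookup = [word]
--         #lookup = [language + ': ' + word]
--         while lookup[-1] in relations and count < threshold:
--             count += 1
--             lookup.append(relations[lookup[-1]])
--         return lookup
--
-- def get_all_from_origin(relations, origin, language=None):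
--     cousins = []
--     count = 0
--     for word in relations:
--         # if word is in any of the parent nodes, then count it
--         if origin in get_origin(relations, word, True)[1:]:
--             cousins.append(word)
--
--     if language is not None:
--         return [c for c in cousins if c.split(': ')[0] == language]
--     return cousins
-- ===== SOURCE B (Python) =====
-- def get_all_from_origin(relations, origin, language=None):
--     # Reverse breadth expansion: children map, then 5 downward steps from origin.
--     children = {}
--     for w, p in relations.items():
--         children.setdefault(p, []).append(w)
--     qualifying = set()
--     frontier = [origin]
--     for _ in range(5):
--         nxt = []
--         for x in frontier:
--             nxt.extend(children.get(x, []))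
--         qualifying.update(nxt)
--         frontier = nxt
--     cousins = [w for w in relations if w in qualifying]
--     if language is not None:
--         return [c for c in cousins if c.split(': ')[0] == language]
--     return cousins
-- ===== Notes on version B (the rewrite author's own statement) =====
-- stated objective: alternative
-- what changed: Replaces the per-word upward parent-chain walk (build each word's ancestor path, test origin membership) with one downward breadth expansion: a reverse children map is built once and the frontier {origin} is expanded 5 levels, collecting every word reached into a qualifying set; the output is the keys filtered by that set.
import Mathlib
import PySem

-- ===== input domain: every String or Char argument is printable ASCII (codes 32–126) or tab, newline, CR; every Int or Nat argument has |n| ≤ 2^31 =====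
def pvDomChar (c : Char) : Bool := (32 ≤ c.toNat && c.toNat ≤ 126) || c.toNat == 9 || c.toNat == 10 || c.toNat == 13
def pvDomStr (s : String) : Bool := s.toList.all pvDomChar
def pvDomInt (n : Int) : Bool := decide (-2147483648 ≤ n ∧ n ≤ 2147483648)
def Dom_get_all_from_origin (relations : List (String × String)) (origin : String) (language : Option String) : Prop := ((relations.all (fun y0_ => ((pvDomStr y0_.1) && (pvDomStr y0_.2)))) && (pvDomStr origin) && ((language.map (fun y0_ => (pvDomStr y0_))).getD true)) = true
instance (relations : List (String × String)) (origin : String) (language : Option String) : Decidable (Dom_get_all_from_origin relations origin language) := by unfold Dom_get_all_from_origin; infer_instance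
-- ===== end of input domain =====

-- B replaces A's per-word upward ancestor-path walk by one downward 5-level breadth
-- expansion from `origin` over a reverse children map (alternative decomposition, same cost).

-- ===== PORT A =====
-- get_origin(relations, word, True): the while loop appending relations[lookup[-1]]
def pyGetOriginPath (d : PySem.Dict String String) (lookup : List String) (count : Nat) : List String :=
  match PySem.List.pyGet? lookup (-1) with
  | none => lookup
  | some last =>
    match d.get? last with
    | none => lookup
    | some v =>
      if _h : count < 5 then pyGetOriginPath d (lookup ++ [v]) (count + 1) else lookup
termination_by 5 - count

def get_all_from_origin (relations : List (String × String)) (origin : String) (language : Option String) : List String :=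
  let d := PySem.Dict.ofList relations
  let cousins := d.keys.foldl
    (fun acc word =>
      if origin ∈ PySem.List.slice (pyGetOriginPath d [word] 0) (some 1) none then acc ++ [word]
      else acc)
    []
  match language with
  | some lang => cousins.filter (fun c =>
      match PySem.Str.split? c ": " with
      | some parts =>
        match PySem.List.pyGet? parts 0 with
        | some h0 => h0 == lang
        | none => false
      | none => false)
  | none => cousins

-- ===== PORT B =====
-- children.setdefault(p, []).append(w)  ==  modify p [] (· ++ [w])  (exact: list is extended in place)
def bChildren (d : PySem.Dict String String) : PySem.Dict String (List String) :=
  d.items.foldl (fun m wp => m.modify wp.2 [] (fun l => l ++ [wp.1])) PySem.Dict.empty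

-- one iteration of the `for _ in range(5)` loop: expand the frontier, add it to the set
def bStep (children : PySem.Dict String (List String)) (st : PySem.Set String × List String) :
    PySem.Set String × List String :=
  let nxt := st.2.foldl (fun acc x => acc ++ children.getD x []) []
  (st.1.update nxt, nxt)

def get_all_from_origin_alt (relations : List (String × String)) (origin : String) (language : Option String) : List String :=
  let d := PySem.Dict.ofList relations
  let children := bChildren d
  let fin := (List.range 5).foldl (fun st _ => bStep children st) (PySem.Set.ofList [], [origin])
  let cousins := d.keys.filter (fun w => fin.1.contains w)
  match language with
  | some lang => cousins.filter (fun c =>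
      match PySem.Str.split? c ": " with
      | some parts =>
        match PySem.List.pyGet? parts 0 with
        | some h0 => h0 == lang
        | none => false
      | none => false)
  | none => cousins

-- ===== PRECONDITION & SPEC =====
def Spec_get_all_from_origin (relations : List (String × String)) (origin : String) (language : Option String) (out : List String) : Prop := out = get_all_from_origin_alt relations origin language
instance (relations : List (String × String)) (origin : String) (language : Option String) (out : List String) : Decidable (Spec_get_all_from_origin relations origin language out) := by unfold Spec_get_all_from_origin; infer_instance

-- ===== CLAIM (what is proved, stated in full; the proofs are below) =====
def Claim_equal_get_all_from_origin : Prop := ∀ (relations : List (String × String)) (origin : String) (language : Option String), Dom_get_all_from_origin relations origin language → Spec_get_all_from_origin relations origin language (get_all_from_origin relations origin language)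

-- ===== LEMMAS AND PROOFS =====

-- the (deterministic) upward chain of at most n ancestors of w
def chainA (d : PySem.Dict String String) : String → Nat → List String
  | _, 0 => []
  | w, n + 1 =>
    match d.get? w with
    | none => []
    | some v => v :: chainA d v n

-- k-fold parent lookup
def iterUp (d : PySem.Dict String String) : Nat → String → Option String
  | 0, w => some w
  | k + 1, w => (d.get? w).bind (iterUp d k)

-- the frontier after k expansion steps
def frontN (ch : PySem.Dict String (List String)) (f : List String) : Nat → List String
  | 0 => f
  | k + 1 => (frontN ch f k).flatMap (fun x => ch.getD x [])

theorem pyGetOriginPath_eq (d : PySem.Dict String String) :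
    ∀ (n c : Nat), n = 5 - c → ∀ (xs : List String) (w : String),
      pyGetOriginPath d (xs ++ [w]) c = xs ++ w :: chainA d w n := by
  intro n
  induction n with
  | zero =>
    intro c hc xs w
    rw [pyGetOriginPath, PySem.List.pyGet?_neg_one, List.getLast?_concat]
    cases h : d.get? w with
    | none => simp [h, chainA]
    | some v =>
      have hge : ¬ c < 5 := by omega
      simp [h, hge, chainA]
  | succ m ih =>
    intro c hc xs w
    rw [pyGetOriginPath, PySem.List.pyGet?_neg_one, List.getLast?_concat]
    cases h : d.get? w with
    | none => simp [chainA, h]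
    | some v =>
      have hlt : c < 5 := by omega
      have hrec := ih (c + 1) (by omega) (xs ++ [w]) v
      simp only [hlt, dif_pos, h]
      rw [hrec]
      simp [chainA, h]

theorem mem_chainA (d : PySem.Dict String String) (origin : String) :
    ∀ (n : Nat) (w : String),
      origin ∈ chainA d w n ↔ ∃ k, 1 ≤ k ∧ k ≤ n ∧ iterUp d k w = some origin := by
  intro n
  induction n with
  | zero =>
    intro w
    simp only [chainA, List.not_mem_nil, false_iff]
    rintro ⟨k, hk1, hk0, -⟩
    omega
  | succ m ih =>
    intro w
    cases h : d.get? w with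
    | none =>
      simp only [chainA, h, List.not_mem_nil, false_iff]
      rintro ⟨k, hk1, -, hit⟩
      match k, hk1 with
      | (j + 1), _ => simp [iterUp, h] at hit
    | some v =>
      simp only [chainA, h, List.mem_cons]
      constructor
      · rintro (rfl | hm)
        · exact ⟨1, le_refl 1, by omega, by simp [iterUp, h]⟩
        · obtain ⟨k, hk1, hk2, hit⟩ := (ih v).mp hm
          exact ⟨k + 1, by omega, by omega, by simp [iterUp, h, hit]⟩
      · rintro ⟨k, hk1, hk2, hit⟩
        match k, hk1 with
        | (j + 1), _ =>
          have hit' : iterUp d j v = some origin := by simpa [iterUp, h] using hit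
          match j with
          | 0 =>
            have : v = origin := by simpa [iterUp] using hit'
            exact Or.inl this.symm
          | (i + 1) =>
            exact Or.inr ((ih v).mpr ⟨i + 1, by omega, by omega, hit'⟩)

theorem mem_bChildren (d : PySem.Dict String String) (hnd : d.keys.Nodup) (w x : String) :
    w ∈ (bChildren d).getD x [] ↔ d.get? w = some x := by
  have hswap : d.items.foldl (fun m wp => m.modify wp.2 [] (fun l => l ++ [wp.1])) PySem.Dict.empty
      = (d.items.map (fun wp => (wp.2, wp.1))).foldl
          (fun m q => m.modify q.1 [] (fun l => l ++ [q.2])) PySem.Dict.empty := by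
    rw [List.foldl_map]
  rw [bChildren, hswap, PySem.Dict.getD_foldl_modify_append,
      PySem.Dict.get?_eq_some_iff_mem_items d w x hnd]
  simp only [PySem.Dict.getD_empty, List.nil_append, List.mem_map, List.mem_filter,
    List.filter_map, List.map_map]
  constructor
  · rintro ⟨⟨a, b⟩, ⟨hmem, hb⟩, rfl⟩
    simp only [Function.comp_apply, beq_iff_eq] at hb ⊢
    exact hb ▸ hmem
  · intro hmem
    exact ⟨(w, x), ⟨hmem, by simp⟩, rfl⟩

theorem mem_frontN (d : PySem.Dict String String) (ch : PySem.Dict String (List String))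
    (origin : String) (hch : ∀ w x, w ∈ ch.getD x [] ↔ d.get? w = some x) :
    ∀ (k : Nat) (w : String), w ∈ frontN ch [origin] k ↔ iterUp d k w = some origin := by
  intro k
  induction k with
  | zero =>
    intro w
    simp only [frontN, List.mem_singleton, iterUp, Option.some.injEq]
  | succ m ih =>
    intro w
    simp only [frontN, List.mem_flatMap, iterUp, Option.bind_eq_some_iff]
    constructor
    · rintro ⟨x, hx, hwx⟩
      exact ⟨x, (hch w x).mp hwx, (ih x).mp hx⟩
    · rintro ⟨x, hwx, hx⟩
      exact ⟨x, (ih x).mpr hx, (hch w x).mpr hwx⟩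

theorem foldl_bStep (ch : PySem.Dict String (List String)) :
    ∀ (n : Nat) (s : PySem.Set String) (f : List String),
      ((List.range n).foldl (fun st _ => bStep ch st) (s, f)).2 = frontN ch f n ∧
      ∀ w, w ∈ ((List.range n).foldl (fun st _ => bStep ch st) (s, f)).1 ↔
        (w ∈ s ∨ ∃ k, 1 ≤ k ∧ k ≤ n ∧ w ∈ frontN ch f k) := by
  intro n
  induction n with
  | zero =>
    intro s f
    refine ⟨rfl, fun w => ?_⟩
    simp only [List.range_zero, List.foldl_nil]
    constructor
    · exact Or.inl
    · rintro (hs | ⟨k, hk1, hk0, -⟩)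
      · exact hs
      · omega
  | succ m ih =>
    intro s f
    obtain ⟨ih2, ih1⟩ := ih s f
    rw [List.range_succ, List.foldl_append, List.foldl_cons, List.foldl_nil]
    set P := (List.range m).foldl (fun st _ => bStep ch st) (s, f) with hP
    have hnxt : P.2.foldl (fun acc x => acc ++ ch.getD x []) [] = frontN ch f (m + 1) := by
      rw [PySem.List.foldl_append_eq_flatMap, List.nil_append, ih2, frontN]
    have hb : bStep ch P = (P.1.update (frontN ch f (m + 1)), frontN ch f (m + 1)) := by
      simp only [bStep, hnxt]
    rw [hb]
    refine ⟨rfl, fun w => ?_⟩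
    simp only [PySem.Set.mem_update, ih1]
    constructor
    · rintro ((hs | ⟨k, hk1, hk2, hm⟩) | hf)
      · exact Or.inl hs
      · exact Or.inr ⟨k, hk1, by omega, hm⟩
      · exact Or.inr ⟨m + 1, by omega, le_refl _, hf⟩
    · rintro (hs | ⟨k, hk1, hk2, hm⟩)
      · exact Or.inl (Or.inl hs)
      · by_cases hk : k ≤ m
        · exact Or.inl (Or.inr ⟨k, hk1, hk, hm⟩)
        · have : k = m + 1 := by omega
          subst this
          exact Or.inr hm

-- per-word agreement and the cousins-list equality, for an arbitrary dict with Nodup keys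
theorem cousins_eq (d : PySem.Dict String String) (hnd : d.keys.Nodup) (origin : String) :
    d.keys.foldl
      (fun acc word =>
        if origin ∈ PySem.List.slice (pyGetOriginPath d [word] 0) (some 1) none then acc ++ [word]
        else acc) []
    = d.keys.filter (fun w =>
        (((List.range 5).foldl (fun st _ => bStep (bChildren d) st)
          (PySem.Set.ofList [], [origin])).1).contains w) := by
  have hbody : (fun (acc : List String) (word : String) =>
      if origin ∈ PySem.List.slice (pyGetOriginPath d [word] 0) (some 1) none then acc ++ [word]
      else acc)
      = (fun acc word =>
      if (decide (origin ∈ PySem.List.slice (pyGetOriginPath d [word] 0) (some 1) none)) = true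
      then acc ++ [(fun x => x) word] else acc) := by
    funext acc word
    simp
  rw [hbody, PySem.List.foldl_append_if, List.nil_append, List.map_id_fun']
  apply List.filter_congr
  intro w _
  rw [Bool.eq_iff_iff, decide_eq_true_eq, PySem.Set.contains_iff]
  have hpath := pyGetOriginPath_eq d 5 0 rfl [] w
  rw [List.nil_append] at hpath
  rw [PySem.List.slice_from _ (by norm_num : (0:Int) ≤ 1), hpath]
  have hfold := foldl_bStep (bChildren d) 5 (PySem.Set.ofList []) [origin]
  rw [(hfold.2 w)]
  simp only [List.nil_append, Int.toNat_one, List.drop_succ_cons, List.drop_zero,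
    PySem.Set.mem_ofList, List.not_mem_nil, false_or]
  rw [mem_chainA]
  constructor
  · rintro ⟨k, hk1, hk2, hit⟩
    exact ⟨k, hk1, hk2,
      (mem_frontN d (bChildren d) origin (fun a b => mem_bChildren d hnd a b) k w).mpr hit⟩
  · rintro ⟨k, hk1, hk2, hm⟩
    exact ⟨k, hk1, hk2,
      (mem_frontN d (bChildren d) origin (fun a b => mem_bChildren d hnd a b) k w).mp hm⟩

-- ===== VERDICT (by name: the statement is the Claim_ definition above) =====
theorem get_all_from_origin_spec : Claim_equal_get_all_from_origin := by
  intro relations origin language _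
  unfold Spec_get_all_from_origin get_all_from_origin get_all_from_origin_alt
  have hc := cousins_eq (PySem.Dict.ofList relations)
    (PySem.Dict.nodup_keys_ofList relations) origin
  cases language <;> simp only [hc]
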